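-- pv_equiv track=rewrite | github.com/MrAndreiL/Python_Lab | lab_2/ex_9.py | spectators
-- ===== SOURCE A (Python) =====
-- def spectators(audience):
--     result = []
--     n = len(audience)
--     m = len(audience[0])
--     for j in range(0, m):
--         best = audience[0][j]
--         for i in range(1, n):
--             if (audience[i][j] <= best):
--                 result.append((i, j))
--             else:
--                 best = audience[i][j]
--     return result
-- ===== SOURCE B (Python) =====
-- def spectators(audience):
--     m = len(audience[0])
--     out = []
--     for j in range(m):
--         col = [row[j] for row in audience]
--         # prefix-maximum table of the column
--         pref = []
--         run = col[0]
--         for x in col: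
--             run = run if run >= x else x
--             pref.append(run)
--         # col[i] paired with pref[i-1] (max of col[0..i-1])
--         i = 1
--         for x, p in zip(col[1:], pref):
--             if x <= p:
--                 out.append((i, j))
--             i += 1
--     return out
-- ===== Notes on version B (the rewrite author's own statement) =====
-- stated objective: alternative
-- what changed: A threads a running 'best' through the index loop; B extracts each column, builds an explicit prefix-maximum table in one pass, then a separate zip pass emits (i,j) whenever col[i] <= pref[i-1].
import Mathlib
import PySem

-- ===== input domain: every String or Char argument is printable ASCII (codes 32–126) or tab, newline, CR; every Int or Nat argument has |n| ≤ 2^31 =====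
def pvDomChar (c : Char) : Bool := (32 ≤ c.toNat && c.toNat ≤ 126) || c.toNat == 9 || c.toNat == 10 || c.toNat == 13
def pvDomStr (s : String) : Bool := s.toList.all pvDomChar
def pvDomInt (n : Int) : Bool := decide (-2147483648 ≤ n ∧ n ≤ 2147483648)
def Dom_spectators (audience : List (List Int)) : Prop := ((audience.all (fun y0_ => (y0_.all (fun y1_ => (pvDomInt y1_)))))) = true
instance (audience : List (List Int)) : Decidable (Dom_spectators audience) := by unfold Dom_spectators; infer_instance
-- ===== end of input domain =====

-- B replaces A's inline running-max update with an explicit per-column prefix-max table and a separate comparison pass (alternative decomposition, same cost).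

-- ===== PORT A =====
-- audience[0] / audience[i][j] raise IndexError outside Pre_; headD/getD are exact inside Pre_.
def spectators (audience : List (List Int)) : List (Int × Int) :=
  let n := audience.length
  let m := (audience.headD []).length
  (List.range m).foldl (fun result j =>
    ((List.range' 1 (n - 1)).foldl (fun (st : List (Int × Int) × Int) i =>
        if ((audience.getD i []).getD j 0) ≤ st.2
        then (st.1 ++ [((i : Int), (j : Int))], st.2)
        else (st.1, (audience.getD i []).getD j 0))
      (result, (audience.headD []).getD j 0)).1) []

-- ===== PORT B =====
-- row[j] / col[0] raise IndexError outside Pre_; getD/headD are exact inside Pre_.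
def spectators_alt (audience : List (List Int)) : List (Int × Int) :=
  let m := (audience.headD []).length
  (List.range m).foldl (fun out j =>
    let col := audience.map (fun row => row.getD j 0)
    let pref := (col.foldl (fun (st : List Int × Int) x =>
        (st.1 ++ [if st.2 ≥ x then st.2 else x], if st.2 ≥ x then st.2 else x))
      ([], col.headD 0)).1
    out ++ (((col.drop 1).zip pref).foldl
        (fun (st : List (Int × Int) × Int) xp =>
          (if xp.1 ≤ xp.2 then st.1 ++ [(st.2, (j : Int))] else st.1, st.2 + 1))
        ([], (1 : Int))).1) []

-- ===== PRECONDITION & SPEC =====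
-- Pre_: Python A raises IndexError on an empty audience (audience[0]) and when some row is
-- shorter than row 0 (audience[i][j]); B raises there too.
def Pre_spectators (audience : List (List Int)) : Prop :=
  audience ≠ [] ∧ ∀ row ∈ audience, (audience.headD []).length ≤ row.length
instance (audience : List (List Int)) : Decidable (Pre_spectators audience) := by unfold Pre_spectators; infer_instance
def pvWitness_spectators : List (List Int) := [[3, 1], [2, 5], [4, 0]]

def Spec_spectators (audience : List (List Int)) (out : List (Int × Int)) : Prop := out = spectators_alt audience
instance (audience : List (List Int)) (out : List (Int × Int)) : Decidable (Spec_spectators audience out) := by unfold Spec_spectators; infer_instance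

-- ===== CLAIM (what is proved, stated in full; the proofs are below) =====
def Claim_equal_spectators : Prop := ∀ (audience : List (List Int)), Dom_spectators audience → Pre_spectators audience → Spec_spectators audience (spectators audience)

-- ===== LEMMAS AND PROOFS =====

-- the common abstraction: indices i (from start) of column entries not exceeding the running max b
def pvPass (j : Nat) : List Int → Int → Int → List (Int × Int)
  | [], _, _ => []
  | x :: xs, b, i =>
    if x ≤ b then ((i : Int), (j : Int)) :: pvPass j xs b (i + 1)
    else pvPass j xs x (i + 1)

def pvMx (b x : Int) : Int := if b ≥ x then b else x

def pvScan : Int → List Int → List Int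
  | _, [] => []
  | b, x :: xs => pvMx b x :: pvScan (pvMx b x) xs

theorem pvInnerA (audience : List (List Int)) (j : Nat) :
    ∀ (ys : List Int) (k : Nat) (b : Int) (acc : List (Int × Int)),
      (audience.map (fun row => row.getD j 0)).drop k = ys →
      (((List.range' k ys.length).foldl (fun (st : List (Int × Int) × Int) i =>
          if ((audience.getD i []).getD j 0) ≤ st.2
          then (st.1 ++ [((i : Int), (j : Int))], st.2)
          else (st.1, (audience.getD i []).getD j 0)) (acc, b)).1)
        = acc ++ pvPass j ys b (k : Int) := by
  intro ys
  induction ys with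
  | nil => intro k b acc h; simp [pvPass]
  | cons y ys ih =>
    intro k b acc h
    have hget : (audience.map (fun row => row.getD j 0))[k]? = some y := by
      have h0 := congrArg (fun l => l[0]?) h
      simpa [List.getElem?_drop] using h0
    have hy : (audience.getD k []).getD j 0 = y := by
      rw [List.getElem?_map] at hget
      rcases Option.map_eq_some_iff.mp hget with ⟨row, hrow, hf⟩
      simp only [List.getD_eq_getElem?_getD, hrow, Option.getD_some]
      simpa using hf
    have hdrop : (audience.map (fun row => row.getD j 0)).drop (k + 1) = ys := by
      have : (audience.map (fun row => row.getD j 0)).drop (k+1)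
          = ((audience.map (fun row => row.getD j 0)).drop k).drop 1 := by
        rw [List.drop_drop]
      rw [this, h]; rfl
    rw [List.length_cons, List.range'_succ, List.foldl_cons]
    by_cases hle : y ≤ b
    · rw [if_pos (by rw [hy]; exact hle)]
      rw [ih (k+1) b (acc ++ [((k : Int), (j : Int))]) hdrop]
      simp [pvPass, hle]
    · rw [if_neg (by rw [hy]; exact hle)]
      rw [hy, ih (k+1) y acc hdrop]
      simp [pvPass, hle]

theorem pvScanFold (xs : List Int) : ∀ (b : Int) (acc : List Int),
    (xs.foldl (fun (st : List Int × Int) x =>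
        (st.1 ++ [if st.2 ≥ x then st.2 else x], if st.2 ≥ x then st.2 else x))
      (acc, b)).1 = acc ++ pvScan b xs := by
  induction xs with
  | nil => intro b acc; simp [pvScan]
  | cons x xs ih =>
    intro b acc
    simp only [List.foldl_cons]
    have h := ih (pvMx b x) (acc ++ [pvMx b x])
    simp only [pvMx] at h
    rw [h]
    simp [pvScan, pvMx]

theorem pvInnerB (j : Nat) : ∀ (ys : List Int) (b : Int) (i : Int) (acc : List (Int × Int)),
    ((ys.zip (b :: pvScan b ys)).foldl
        (fun (st : List (Int × Int) × Int) xp =>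
          (if xp.1 ≤ xp.2 then st.1 ++ [(st.2, (j : Int))] else st.1, st.2 + 1))
        (acc, i)).1 = acc ++ pvPass j ys b i := by
  intro ys
  induction ys with
  | nil => intro b i acc; simp [pvPass]
  | cons y ys ih =>
    intro b i acc
    simp only [pvScan, List.zip_cons_cons, List.foldl_cons]
    by_cases hle : y ≤ b
    · have hmx : pvMx b y = b := by simp [pvMx]; omega
      rw [if_pos hle, hmx, ih b (i+1) (acc ++ [(i, (j : Int))])]
      simp [pvPass, hle]
    · have hmx : pvMx b y = y := by simp [pvMx]; omega
      rw [if_neg hle, hmx, ih y (i+1) acc]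
      simp [pvPass, hle]

theorem pvCol_head (audience : List (List Int)) (j : Nat) :
    (audience.map (fun row => row.getD j 0)).headD 0 = (audience.headD []).getD j 0 := by
  cases audience <;> simp

theorem pvStep_eq (audience : List (List Int)) (acc : List (Int × Int)) (j : Nat) :
    (((List.range' 1 (audience.length - 1)).foldl (fun (st : List (Int × Int) × Int) i =>
        if ((audience.getD i []).getD j 0) ≤ st.2
        then (st.1 ++ [((i : Int), (j : Int))], st.2)
        else (st.1, (audience.getD i []).getD j 0))
      (acc, (audience.headD []).getD j 0)).1)
    = (let col := audience.map (fun row => row.getD j 0)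
       let pref := (col.foldl (fun (st : List Int × Int) x =>
          (st.1 ++ [if st.2 ≥ x then st.2 else x], if st.2 ≥ x then st.2 else x))
        ([], col.headD 0)).1
       acc ++ (((col.drop 1).zip pref).foldl
          (fun (st : List (Int × Int) × Int) xp =>
            (if xp.1 ≤ xp.2 then st.1 ++ [(st.2, (j : Int))] else st.1, st.2 + 1))
          ([], (1 : Int))).1) := by
  simp only
  rw [pvScanFold, List.nil_append]
  set col := audience.map (fun row => row.getD j 0) with hcol
  have hlen : audience.length - 1 = (col.drop 1).length := by
    simp [hcol]
  have hA := pvInnerA audience j (col.drop 1) 1 ((audience.headD []).getD j 0) acc rfl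
  rw [hlen, hA]
  have hb : (audience.headD []).getD j 0 = col.headD 0 := (pvCol_head audience j).symm
  rw [hb]
  -- align B's zip over pref = scan (headD) col with (headD :: scan over the tail)
  cases audience with
  | nil => simp [hcol, pvPass]
  | cons r rest =>
    have : pvScan (col.headD 0) col = col.headD 0 :: pvScan (col.headD 0) (col.drop 1) := by
      simp only [hcol, List.map_cons, List.headD_cons, List.drop_succ_cons, List.drop_zero]
      simp [pvScan, pvMx]
    rw [this, pvInnerB j (col.drop 1) (col.headD 0) 1 []]
    simp

-- ===== VERDICT (by name: the statement is the Claim_ definition above) =====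
theorem spectators_spec : Claim_equal_spectators := by
  intro audience _ _
  unfold Spec_spectators spectators spectators_alt
  simp only
  induction (List.range ((audience.headD []).length)) using List.reverseRecOn with
  | nil => rfl
  | append_singleton l j ih =>
    rw [List.foldl_append, List.foldl_append, ih]
    simp only [List.foldl_cons, List.foldl_nil]
    exact pvStep_eq audience _ j
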